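-- pv_equiv track=rewrite | github.com/Kapil-1729/Codechef | covidlq.py | covid19
-- ===== SOURCE A (Python) =====
-- def covid19(arr,n):
--     flag=False
--     for i in range(n):
--         if arr[i]==1:
--             if not flag:
--                 flag=True
--                 left=i
--                 continue
--             if (i-left)<6:
--                 return False
--             else:
--                 left=i
--     return True
-- ===== SOURCE B (Python) =====
-- def covid19(arr, n):
--     for i in range(n):
--         if arr[i] == 1 and any(arr[j] == 1 for j in range(i + 1, min(i + 6, n))):
--             return False
--     return True
-- ===== Notes on version B (the rewrite author's own statement) =====
-- stated objective: alternative
-- what changed: Replaces the flag/left sentinel state machine (remembering the previous 1) by a memoryless nested window scan: for each 1 at index i, scan the bounded forward window range(i+1, min(i+6, n)) for another 1; Pre_ excludes n > len(arr), where indexing goes out of range and both programs raise IndexError unless a close pair of 1s occurs before the bad index, in which case both return False.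
-- outside the precondition, e.g. on covid19([1, 163, 1, 9, -3], 7): A returns False, B returns False
import Mathlib
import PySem

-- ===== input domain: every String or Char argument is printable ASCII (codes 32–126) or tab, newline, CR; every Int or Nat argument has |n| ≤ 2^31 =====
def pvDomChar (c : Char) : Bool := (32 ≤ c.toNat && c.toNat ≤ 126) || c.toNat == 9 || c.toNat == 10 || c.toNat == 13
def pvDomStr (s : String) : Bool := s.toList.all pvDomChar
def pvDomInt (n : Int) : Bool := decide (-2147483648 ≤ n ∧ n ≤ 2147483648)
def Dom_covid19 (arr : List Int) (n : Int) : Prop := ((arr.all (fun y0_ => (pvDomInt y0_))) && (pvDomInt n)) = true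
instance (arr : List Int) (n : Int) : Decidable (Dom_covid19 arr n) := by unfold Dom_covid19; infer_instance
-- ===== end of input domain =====

-- B replaces A's single-pass flag/left state machine by a memoryless nested window scan:
-- for each 1 at index i, scan the forward window range(i+1, min(i+6, n)) for another 1
-- (objective: alternative; same asymptotic cost).

-- ===== PORT A =====
-- the for-loop with state (flag, left) and early 'return False'; under Pre_ every
-- index i of range(n) is in range, so arr[i] is ported as pyGetD arr i 0 (exact there)
def covidLoopA (arr : List Int) (idxs : List Int) (flag : Bool) (left : Int) : Bool :=
  match idxs with
  | [] => true
  | i :: rest =>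
      if PySem.List.pyGetD arr i 0 = 1 then
        if !flag then covidLoopA arr rest true i
        else if i - left < 6 then false
        else covidLoopA arr rest true i
      else covidLoopA arr rest flag left

def covid19 (arr : List Int) (n : Int) : Bool :=
  covidLoopA arr (PySem.List.pyRange 0 n 1) false 0

-- ===== PORT B =====
-- outer loop over range(n); 'arr[i] == 1 and any(arr[j] == 1 for j in range(i+1, min(i+6, n)))'
def covidLoopB (arr : List Int) (n : Int) : List Int → Bool
  | [] => true
  | i :: rest =>
      if (PySem.List.pyGetD arr i 0 == 1)
         && ((PySem.List.pyRange (i + 1) (min (i + 6) n) 1).any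
              (fun j => PySem.List.pyGetD arr j 0 == 1)) then false
      else covidLoopB arr n rest

def covid19_alt (arr : List Int) (n : Int) : Bool :=
  covidLoopB arr n (PySem.List.pyRange 0 n 1)

-- ===== PRECONDITION & SPEC =====
-- Pre_ excludes n > len(arr): there indexing goes out of range and both programs raise
-- IndexError, unless a close pair of 1s occurs before the bad index, where both return False
def Pre_covid19 (arr : List Int) (n : Int) : Prop := n ≤ (arr.length : Int)
instance (arr : List Int) (n : Int) : Decidable (Pre_covid19 arr n) := by unfold Pre_covid19; infer_instance

def pvWitness_covid19 : List Int × Int := ([1, 0, 0, 0, 0, 0, 1], 7)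

def Spec_covid19 (arr : List Int) (n : Int) (out : Bool) : Prop := out = covid19_alt arr n
instance (arr : List Int) (n : Int) (out : Bool) : Decidable (Spec_covid19 arr n out) := by unfold Spec_covid19; infer_instance

-- ===== CLAIM (what is proved, stated in full; the proofs are below) =====
def Claim_equal_covid19 : Prop := ∀ (arr : List Int) (n : Int), Dom_covid19 arr n → Pre_covid19 arr n → Spec_covid19 arr n (covid19 arr n)

-- ===== LEMMAS AND PROOFS =====
-- common characterisation: the gaps of the list of 1-positions
def gapsOk : List Int → Bool
  | a :: b :: rest => if b - a ≥ 6 then gapsOk (b :: rest) else false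
  | _ => true

theorem covidLoopA_eq (arr : List Int) (idxs : List Int) :
    (∀ l, covidLoopA arr idxs true l
        = gapsOk (l :: idxs.filter (fun i => PySem.List.pyGetD arr i 0 = 1)))
    ∧ (∀ left, covidLoopA arr idxs false left
        = gapsOk (idxs.filter (fun i => PySem.List.pyGetD arr i 0 = 1))) := by
  induction idxs with
  | nil => simp [covidLoopA, gapsOk]
  | cons i rest ih =>
      constructor <;> intro l
      · by_cases h : PySem.List.pyGetD arr i 0 = 1
        · simp only [covidLoopA, List.filter_cons, h, if_pos, decide_true, gapsOk]
          by_cases h6 : i - l < 6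
          · have : ¬ i - l ≥ 6 := by omega
            simp [h6, this]
          · have : i - l ≥ 6 := by omega
            simp [h6, this, ih.1 i]
        · simp [covidLoopA, h, ih.1 l]
      · by_cases h : PySem.List.pyGetD arr i 0 = 1
        · simp [covidLoopA, h, ih.1 i]
        · simp [covidLoopA, h, ih.2 l]

-- head of the filtered range is ≤ any member satisfying the predicate
theorem filter_range_head_le (p : Int → Bool) (n : Int) :
    ∀ (m : Nat) (a j : Int), (n - a).toNat = m → a ≤ j → j < n → p j = true →
      ∃ b r, (PySem.List.pyRange a n 1).filter p = b :: r ∧ b ≤ j := by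
  intro m
  induction m with
  | zero => intro a j hm haj hjn _; omega
  | succ m ih =>
      intro a j hm haj hjn hpj
      have ha : a < n := by omega
      rw [PySem.List.pyRange_one_cons ha, List.filter_cons]
      by_cases hpa : p a = true
      · exact ⟨a, (PySem.List.pyRange (a + 1) n 1).filter p, by simp [hpa], haj⟩
      · have hne : j ≠ a := fun h => hpa (h ▸ hpj)
        have ⟨b, r, hbr, hb⟩ := ih (a + 1) j (by omega) (by omega) hjn hpj
        exact ⟨b, r, by simp [hpa, hbr], hb⟩

theorem loopB_eq_aux (arr : List Int) (n : Int) :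
    ∀ (m : Nat) (k : Int), (n - k).toNat = m →
      covidLoopB arr n (PySem.List.pyRange k n 1)
        = gapsOk ((PySem.List.pyRange k n 1).filter (fun i => PySem.List.pyGetD arr i 0 = 1)) := by
  intro m
  induction m with
  | zero =>
      intro k hm
      rw [PySem.List.pyRange_one_eq_nil (by omega)]
      simp [covidLoopB, gapsOk]
  | succ m ih =>
      intro k hm
      have hk : k < n := by omega
      rw [PySem.List.pyRange_one_cons hk, List.filter_cons]
      by_cases h1 : PySem.List.pyGetD arr k 0 = 1
      · by_cases hW : ((PySem.List.pyRange (k + 1) (min (k + 6) n) 1).any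
              (fun j => PySem.List.pyGetD arr j 0 == 1)) = true
        · -- a 1 within the window: both sides are false
          simp only [covidLoopB, h1, beq_self_eq_true, hW, Bool.and_self, if_true]
          obtain ⟨j, hjmem, hpj⟩ := List.any_eq_true.mp hW
          have hj := (PySem.List.mem_pyRange_one).mp hjmem
          obtain ⟨b, r, hbr, hb⟩ := filter_range_head_le
            (fun i => decide (PySem.List.pyGetD arr i 0 = 1)) n (n - (k+1)).toNat (k + 1) j rfl
            (by omega) (by omega) (by simpa using hpj)
          rw [show ((PySem.List.pyRange (k+1) n 1).filter fun i => decide (PySem.List.pyGetD arr i 0 = 1)) = b :: r from hbr]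
          simp only [decide_true, if_pos, gapsOk]
          have : ¬ b - k ≥ 6 := by omega
          simp [this]
        · -- no 1 within the window
          have hrec : covidLoopB arr n (k :: PySem.List.pyRange (k+1) n 1)
              = covidLoopB arr n (PySem.List.pyRange (k+1) n 1) := by
            simp [covidLoopB, hW]
          rw [hrec, ih (k + 1) (by omega)]
          simp only [h1, decide_true, if_pos]
          cases hF : ((PySem.List.pyRange (k+1) n 1).filter fun i => decide (PySem.List.pyGetD arr i 0 = 1)) with
          | nil => simp [gapsOk]
          | cons b r =>
              have hbmem : b ∈ (PySem.List.pyRange (k+1) n 1).filter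
                  (fun i => decide (PySem.List.pyGetD arr i 0 = 1)) := by rw [hF]; exact List.mem_cons_self
              have ⟨hbr, hpb⟩ := List.mem_filter.mp hbmem
              have hbrange := (PySem.List.mem_pyRange_one).mp hbr
              have hb6 : b ≥ k + 6 := by
                by_contra hlt
                have : b ∈ PySem.List.pyRange (k + 1) (min (k + 6) n) 1 :=
                  (PySem.List.mem_pyRange_one).mpr (by omega)
                exact hW (List.any_eq_true.mpr ⟨b, this, by simpa using hpb⟩)
              simp only [gapsOk]
              have : b - k ≥ 6 := by omega
              simp [this]
      · simp only [covidLoopB, h1]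
        have : (PySem.List.pyGetD arr k 0 == 1) = false := by simpa using h1
        simp only [this, Bool.false_and, if_neg Bool.false_ne_true]
        rw [ih (k + 1) (by omega)]
        simp

-- ===== VERDICT (by name: the statement is the Claim_ definition above) =====
theorem covid19_spec : Claim_equal_covid19 := by
  intro arr n _ _
  unfold Spec_covid19 covid19 covid19_alt
  rw [(covidLoopA_eq arr _).2 0, loopB_eq_aux arr n (n - 0).toNat 0 rfl]
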